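-- pv_equiv track=rewrite | github.com/youth4ever/orion | Project EULER/pb113 Non-bouncy numbers.py | monotonic_number
-- ===== SOURCE A (Python) =====
-- def monotonic_number(n) :       # Non-bouncy
--     ''':Description: Function to check if a number is non-bouncy (monotonic).
--     Example : 12235, 22222, 1579, 23459 , 885522, 9821, 966661  - are non-bouncy (monotonic)
--
--     :param n: int, the number to check
--     :return: boolean, True or False
--     '''
--     listN = list(str(n))
--     flag1 = False
--     flag2 = False
--     for i in range(1, len(listN)):
--         if listN[i] > listN[i-1]:
--             flag1 = True
--         if listN[i] < listN[i-1]: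
--             flag2 = True
--     if flag1 == True and flag2 == True:
--         return False
--     else : return True
-- ===== SOURCE B (Python) =====
-- def monotonic_number(n):
--     s = list(str(n))
--     return s == sorted(s) or s == sorted(s, reverse=True)
-- ===== Notes on version B (the rewrite author's own statement) =====
-- stated objective: simpler
-- what changed: Replaces the indexed adjacency-flag scan with a sort-and-compare: the digit-character list is non-bouncy iff it equals its sorted ascending or sorted descending version.
import Mathlib
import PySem

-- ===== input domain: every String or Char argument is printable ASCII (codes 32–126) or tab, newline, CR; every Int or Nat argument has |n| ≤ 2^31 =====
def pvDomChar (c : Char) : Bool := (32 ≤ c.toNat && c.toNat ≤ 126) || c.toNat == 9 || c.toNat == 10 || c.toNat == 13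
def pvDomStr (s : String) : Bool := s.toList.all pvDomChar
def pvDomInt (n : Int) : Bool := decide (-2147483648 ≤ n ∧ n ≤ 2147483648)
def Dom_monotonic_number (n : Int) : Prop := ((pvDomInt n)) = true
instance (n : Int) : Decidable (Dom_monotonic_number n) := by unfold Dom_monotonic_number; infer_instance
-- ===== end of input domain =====

-- B replaces A's indexed adjacency-flag scan by sort-and-compare (same values on all ints; objective: simpler).

-- ===== PORT A =====
def monotonic_number (n : Int) : Bool :=
  let listN := (PySem.Int.toStr n).toList
  let flags := (PySem.List.pyRange 1 (listN.length : Int) 1).foldl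
    (fun (fl : Bool × Bool) i =>
      let flag1 := if PySem.List.pyGetD listN i ' ' > PySem.List.pyGetD listN (i - 1) ' ' then true else fl.1
      let flag2 := if PySem.List.pyGetD listN i ' ' < PySem.List.pyGetD listN (i - 1) ' ' then true else fl.2
      (flag1, flag2))
    (false, false)
  if flags.1 == true && flags.2 == true then false else true

-- ===== PORT B =====
def monotonic_number_alt (n : Int) : Bool :=
  let s := (PySem.Int.toStr n).toList
  s == PySem.List.sorted s (fun c => c) false || s == PySem.List.sorted s (fun c => c) true

-- ===== PRECONDITION & SPEC =====
def Spec_monotonic_number (n : Int) (out : Bool) : Prop := out = monotonic_number_alt n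
instance (n : Int) (out : Bool) : Decidable (Spec_monotonic_number n out) := by unfold Spec_monotonic_number; infer_instance

-- ===== CLAIM (what is proved, stated in full; the proofs are below) =====
def Claim_equal_monotonic_number : Prop := ∀ (n : Int), Dom_monotonic_number n → Spec_monotonic_number n (monotonic_number n)

-- ===== LEMMAS AND PROOFS =====

/-- some adjacent strictly increasing pair -/
def pvHasInc : List Char → Bool
  | a :: b :: t => decide (a < b) || pvHasInc (b :: t)
  | _ => false

/-- some adjacent strictly decreasing pair -/
def pvHasDec : List Char → Bool
  | a :: b :: t => decide (b < a) || pvHasDec (b :: t)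
  | _ => false

/-- the Nat-indexed form of A's flag loop -/
lemma pvFold (l : List Char) (fl : Bool × Bool) :
    (List.range (l.length - 1)).foldl
      (fun (fl : Bool × Bool) k =>
        (if l.getD k ' ' < l.getD (k + 1) ' ' then true else fl.1,
         if l.getD (k + 1) ' ' < l.getD k ' ' then true else fl.2)) fl
    = (fl.1 || pvHasInc l, fl.2 || pvHasDec l) := by
  induction l generalizing fl with
  | nil => simp [pvHasInc, pvHasDec]
  | cons a l ih =>
    match l with
    | [] => simp [pvHasInc, pvHasDec]
    | b :: t =>
      have hlen : (a :: b :: t).length - 1 = t.length + 1 := by simp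
      rw [hlen, List.range_succ_eq_map, List.foldl_cons, List.foldl_map]
      have hbody : (fun (fl : Bool × Bool) (k : Nat) =>
          (if (a :: b :: t).getD (k + 1) ' ' < (a :: b :: t).getD (k + 1 + 1) ' ' then true else fl.1,
           if (a :: b :: t).getD (k + 1 + 1) ' ' < (a :: b :: t).getD (k + 1) ' ' then true else fl.2))
          = (fun (fl : Bool × Bool) (k : Nat) =>
          (if (b :: t).getD k ' ' < (b :: t).getD (k + 1) ' ' then true else fl.1,
           if (b :: t).getD (k + 1) ' ' < (b :: t).getD k ' ' then true else fl.2)) := by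
        funext fl k
        simp
      have hlen2 : t.length = (b :: t).length - 1 := by simp
      rw [hbody, hlen2, ih]
      simp only [List.getD_cons_succ, List.getD_cons_zero, pvHasInc, pvHasDec]
      cases fl with
      | mk f1 f2 =>
        by_cases h1 : a < b <;> by_cases h2 : b < a <;> simp [h1, h2]

/-- A's pyRange flag loop computes the two adjacency flags -/
lemma pvPortFold (l : List Char) :
    (PySem.List.pyRange 1 (l.length : Int) 1).foldl
      (fun (fl : Bool × Bool) i =>
        (if PySem.List.pyGetD l i ' ' > PySem.List.pyGetD l (i - 1) ' ' then true else fl.1,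
         if PySem.List.pyGetD l i ' ' < PySem.List.pyGetD l (i - 1) ' ' then true else fl.2))
      (false, false)
    = (pvHasInc l, pvHasDec l) := by
  rw [PySem.List.pyRange_one]
  have h0 : ((l.length : Int) - 1).toNat = l.length - 1 := by omega
  rw [h0, List.foldl_map]
  have hbody : (fun (fl : Bool × Bool) (k : Nat) =>
      (if PySem.List.pyGetD l (1 + (k : Int)) ' ' > PySem.List.pyGetD l (1 + (k : Int) - 1) ' ' then true else fl.1,
       if PySem.List.pyGetD l (1 + (k : Int)) ' ' < PySem.List.pyGetD l (1 + (k : Int) - 1) ' ' then true else fl.2))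
      = (fun (fl : Bool × Bool) (k : Nat) =>
      (if l.getD k ' ' < l.getD (k + 1) ' ' then true else fl.1,
       if l.getD (k + 1) ' ' < l.getD k ' ' then true else fl.2)) := by
    funext fl k
    have e1 : (1 : Int) + (k : Int) = ((k + 1 : Nat) : Int) := by omega
    have e2 : (1 : Int) + (k : Int) - 1 = ((k : Nat) : Int) := by omega
    rw [e2, e1, PySem.List.pyGetD_natCast, PySem.List.pyGetD_natCast]
  rw [hbody, pvFold]
  simp

lemma pvHasDec_false_iff (l : List Char) : pvHasDec l = false ↔ l.IsChain (· ≤ ·) := by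
  induction l with
  | nil => simp [pvHasDec]
  | cons a l ih =>
    match l with
    | [] => simp [pvHasDec]
    | b :: t =>
      simp only [pvHasDec, Bool.or_eq_false_iff, decide_eq_false_iff_not, not_lt,
        List.isChain_cons_cons] at *
      constructor
      · rintro ⟨h1, h2⟩; exact ⟨h1, ih.mp h2⟩
      · rintro ⟨h1, h2⟩; exact ⟨h1, ih.mpr h2⟩

lemma pvHasInc_false_iff (l : List Char) : pvHasInc l = false ↔ l.IsChain (fun a b => b ≤ a) := by
  induction l with
  | nil => simp [pvHasInc]
  | cons a l ih =>
    match l with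
    | [] => simp [pvHasInc]
    | b :: t =>
      simp only [pvHasInc, Bool.or_eq_false_iff, decide_eq_false_iff_not, not_lt,
        List.isChain_cons_cons] at *
      constructor
      · rintro ⟨h1, h2⟩; exact ⟨h1, ih.mp h2⟩
      · rintro ⟨h1, h2⟩; exact ⟨h1, ih.mpr h2⟩

lemma pvSortedF_iff (l : List Char) : PySem.List.sorted l (fun c => c) false = l ↔ pvHasDec l = false := by
  rw [pvHasDec_false_iff, List.isChain_iff_pairwise]
  constructor
  · intro h; rw [← h]; exact PySem.List.sorted_pairwise l (fun c => c)
  · exact fun h => PySem.List.sorted_eq_self_of_pairwise l (fun c => c) h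
  
lemma pvSortedR_iff (l : List Char) : PySem.List.sorted l (fun c => c) true = l ↔ pvHasInc l = false := by
  rw [pvHasInc_false_iff, List.isChain_iff_pairwise]
  constructor
  · intro h; rw [← h]; exact PySem.List.sorted_pairwise_rev l (fun c => c)
  · exact fun h => PySem.List.sorted_rev_eq_self_of_pairwise l (fun c => c) h

-- ===== VERDICT (by name: the statement is the Claim_ definition above) =====
theorem monotonic_number_spec : Claim_equal_monotonic_number := by
  intro n _
  unfold Spec_monotonic_number
  simp only [monotonic_number, monotonic_number_alt, pvPortFold]
  set l := (PySem.Int.toStr n).toList with hl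
  have hF := pvSortedF_iff l
  have hR := pvSortedR_iff l
  have hF2 : (l == PySem.List.sorted l (fun c => c) false) = !pvHasDec l := by
    cases hd : pvHasDec l
    · simp only [Bool.not_false, beq_iff_eq]
      exact (hF.mpr hd).symm
    · simp only [Bool.not_true, beq_eq_false_iff_ne, ne_eq]
      intro h
      have h2 := hF.mp h.symm
      rw [hd] at h2
      simp at h2
  have hR2 : (l == PySem.List.sorted l (fun c => c) true) = !pvHasInc l := by
    cases hi : pvHasInc l
    · simp only [Bool.not_false, beq_iff_eq]
      exact (hR.mpr hi).symm
    · simp only [Bool.not_true, beq_eq_false_iff_ne, ne_eq]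
      intro h
      have h2 := hR.mp h.symm
      rw [hi] at h2
      simp at h2
  cases hi : pvHasInc l <;> cases hd : pvHasDec l <;> simp [hi, hd, hF2, hR2]
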